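-- pv_equiv track=rewrite | github.com/JohnLonginotto/ACGTrie | acgtrie/base_acgtrie.py | seq_to_up_to_29
-- ===== SOURCE A (Python) =====
-- def seq_to_up_to_29(seq):
--     shift = 64 - 6
--     result = len(seq) << shift
--     for letter in seq:
--         if letter == 'A':
--             bits = 0
--         elif letter == 'C':
--             bits = 1
--         elif letter == 'G':
--             bits = 2
--         else:
--             bits = 3
--         shift -= 2
--         result |= bits << shift
--     return result
-- ===== SOURCE B (Python) =====
-- def _enc(seq):
--     # divide and conquer: encode each half, combine with one shift-or
--     n = len(seq)
--     if n == 0: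
--         return 0
--     if n == 1:
--         if seq == 'A':
--             return 0
--         if seq == 'C':
--             return 1
--         if seq == 'G':
--             return 2
--         return 3
--     mid = n // 2
--     right = seq[mid:]
--     return (_enc(seq[:mid]) << (2 * len(right))) | _enc(right)
--
--
-- def seq_to_up_to_29(seq):
--     return (len(seq) << 58) | (_enc(seq) << (58 - 2 * len(seq)))
-- ===== Notes on version B (the rewrite author's own statement) =====
-- stated objective: alternative
-- what changed: Replaces A's single left-to-right pass with a mutable shift counter by a divide-and-conquer recursion that encodes each half of the sequence independently and combines the halves with one shift-or, placing the whole code once under len<<58.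
import Mathlib
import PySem

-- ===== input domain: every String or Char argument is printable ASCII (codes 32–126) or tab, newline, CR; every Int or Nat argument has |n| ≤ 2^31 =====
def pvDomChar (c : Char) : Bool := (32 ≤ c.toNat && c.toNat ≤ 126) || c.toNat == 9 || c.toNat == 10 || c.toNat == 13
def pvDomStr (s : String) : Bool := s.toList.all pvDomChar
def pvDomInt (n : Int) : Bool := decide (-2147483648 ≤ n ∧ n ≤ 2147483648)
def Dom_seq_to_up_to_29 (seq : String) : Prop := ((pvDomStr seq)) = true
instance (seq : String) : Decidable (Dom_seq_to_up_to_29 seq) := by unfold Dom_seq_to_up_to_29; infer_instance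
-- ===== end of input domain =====

-- B replaces A's left-to-right loop (mutable shift counter, OR each step) by a
-- divide-and-conquer recursion on halves combined with one shift-or (objective: alternative).

-- ===== PORT A =====
-- literal transliteration of A: state (shift, result), bits from the if-chain,
-- result |= bits << shift each step; shift.toNat is exact since Pre_ keeps shift ≥ 0.
def seq_to_up_to_29 (seq : String) : Int :=
  let shift : Int := 64 - 6
  let result : Int := (seq.length : Int) <<< shift.toNat
  (seq.toList.foldl (fun (st : Int × Int) letter =>
      let bits : Int :=
        if letter = 'A' then 0
        else if letter = 'C' then 1
        else if letter = 'G' then 2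
        else 3
      let shift := st.1 - 2
      (shift, PySem.Int.bor st.2 (bits <<< shift.toNat))) (shift, result)).2

-- ===== PORT B =====
-- _enc of Source B: divide and conquer on the list of letters; seq[:mid]/seq[mid:] with
-- 0 ≤ mid ≤ len are exactly List.take/List.drop.
def encB (ls : List Char) : Int :=
  if ls.length = 0 then 0
  else if h1 : ls.length = 1 then
    match ls with
    | c :: _ =>
        if c = 'A' then 0 else if c = 'C' then 1 else if c = 'G' then 2 else 3
    | [] => 0
  else
    let mid := ls.length / 2
    let right := ls.drop mid
    PySem.Int.bor (encB (ls.take mid) <<< (2 * right.length)) (encB right)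
termination_by ls.length
decreasing_by
  · simp only [List.length_take]; omega
  · simp only [List.length_drop]; omega

-- the final shift (58 - 2*len) is nonnegative inside Pre_; .toNat is exact there.
def seq_to_up_to_29_alt (seq : String) : Int :=
  PySem.Int.bor ((seq.length : Int) <<< (58 : Nat))
    (encB seq.toList <<< ((58 - 2 * (seq.length : Int)).toNat))

-- ===== PRECONDITION & SPEC =====
-- Python A raises ValueError (negative shift count) once a 30th letter is reached,
-- so Pre_ admits exactly the strings of length ≤ 29 (B raises there too).
def Pre_seq_to_up_to_29 (seq : String) : Prop := seq.length ≤ 29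
instance (seq : String) : Decidable (Pre_seq_to_up_to_29 seq) := by unfold Pre_seq_to_up_to_29; infer_instance
def pvWitness_seq_to_up_to_29 : String := "ACGTN"

def Spec_seq_to_up_to_29 (seq : String) (out : Int) : Prop := out = seq_to_up_to_29_alt seq
instance (seq : String) (out : Int) : Decidable (Spec_seq_to_up_to_29 seq out) := by unfold Spec_seq_to_up_to_29; infer_instance

-- ===== CLAIM (what is proved, stated in full; the proofs are below) =====
def Claim_equal_seq_to_up_to_29 : Prop := ∀ (seq : String), Dom_seq_to_up_to_29 seq → Pre_seq_to_up_to_29 seq → Spec_seq_to_up_to_29 seq (seq_to_up_to_29 seq)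

-- ===== LEMMAS AND PROOFS =====

-- the 2-bit code of one letter, as a Nat
def codeN (c : Char) : Nat :=
  if c = 'A' then 0 else if c = 'C' then 1 else if c = 'G' then 2 else 3

-- base-4 value of a list of letters, started at m
def accN (m : Nat) (ls : List Char) : Nat :=
  ls.foldl (fun a c => a * 4 + codeN c) m

theorem codeN_lt (c : Char) : codeN c < 4 := by
  unfold codeN; split_ifs <;> omega

theorem bits_eq_codeN (c : Char) :
    (if c = 'A' then (0:Int) else if c = 'C' then 1 else if c = 'G' then 2 else 3)
      = (codeN c : Int) := by
  unfold codeN; split_ifs <;> simp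

theorem accN_split (ls : List Char) : ∀ m, accN m ls = m * 4 ^ ls.length + accN 0 ls := by
  induction ls with
  | nil => intro m; simp [accN]
  | cons c ls ih =>
      intro m
      have h1 : accN m (c :: ls) = accN (m * 4 + codeN c) ls := rfl
      have h2 : accN 0 (c :: ls) = accN (0 * 4 + codeN c) ls := rfl
      rw [h1, h2, ih (m * 4 + codeN c), ih (0 * 4 + codeN c), List.length_cons]
      ring

theorem accN_lt (ls : List Char) : accN 0 ls < 4 ^ ls.length := by
  induction ls with
  | nil => simp [accN]
  | cons c ls ih =>
      have hc := codeN_lt c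
      have h2 : accN 0 (c :: ls) = accN (0 * 4 + codeN c) ls := rfl
      rw [h2, accN_split ls (0 * 4 + codeN c), List.length_cons]
      have h4 : (0 * 4 + codeN c) * 4 ^ ls.length ≤ 3 * 4 ^ ls.length :=
        Nat.mul_le_mul_right _ (by omega)
      have h5 : (4:Nat) ^ (ls.length + 1) = 4 * 4 ^ ls.length := by ring
      omega

theorem accN_append (l r : List Char) :
    accN 0 (l ++ r) = accN 0 l * 4 ^ r.length + accN 0 r := by
  have h : accN 0 (l ++ r) = accN (accN 0 l) r := List.foldl_append
  rw [h, accN_split r (accN 0 l)]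

-- OR of bit-disjoint naturals is their sum
theorem lor_disjoint : ∀ (t a b : Nat), 2 ^ t ∣ a → b < 2 ^ t → a ||| b = a + b := by
  intro t
  induction t with
  | zero =>
      intro a b _ hb
      have : b = 0 := by omega
      simp [this]
  | succ t ih =>
      intro a b ha hb
      obtain ⟨c, rfl⟩ := ha
      have hbit : 2 ^ (t + 1) * c = Nat.bit false (2 ^ t * c) := by
        rw [Nat.bit_val, pow_succ]; simp; ring
      have hdiv : b >>> 1 = b / 2 := by simp [Nat.shiftRight_one]
      have hpow : (2:Nat) ^ (t + 1) = 2 * 2 ^ t := by ring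
      have hlt : b >>> 1 < 2 ^ t := by rw [hdiv]; omega
      have htb : (b.testBit 0).toNat = b % 2 := by
        rcases Nat.mod_two_eq_zero_or_one b with h | h <;> simp [Nat.testBit_zero, h]
      calc 2 ^ (t + 1) * c ||| b
          = Nat.bit false (2 ^ t * c) ||| Nat.bit (b.testBit 0) (b >>> 1) := by
            rw [← hbit, Nat.bit_testBit_zero_shiftRight_one b]
        _ = Nat.bit (b.testBit 0) ((2 ^ t * c) ||| (b >>> 1)) := by
            rw [Nat.lor_bit, Bool.false_or]
        _ = Nat.bit (b.testBit 0) (2 ^ t * c + b >>> 1) := by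
            rw [ih _ _ ⟨c, rfl⟩ hlt]
        _ = 2 ^ (t + 1) * c + b := by
            have hx : 2 ^ (t + 1) * c = 2 * (2 ^ t * c) := by rw [hpow]; ring
            rw [Nat.bit_val, hdiv, htb]
            omega

theorem cast_shiftLeft (m n : Nat) : ((m : Int)) <<< n = ((m <<< n : Nat) : Int) := by
  rw [Int.shiftLeft_eq, Nat.shiftLeft_eq]
  push_cast
  ring

-- the loop invariant of A's fold
theorem loopA (ls : List Char) : ∀ (s m : Nat), 2 * ls.length ≤ s →
    (ls.foldl (fun (st : Int × Int) letter =>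
      let bits : Int :=
        if letter = 'A' then 0
        else if letter = 'C' then 1
        else if letter = 'G' then 2
        else 3
      let shift := st.1 - 2
      (shift, PySem.Int.bor st.2 (bits <<< shift.toNat))) ((s : Int), ((m * 2 ^ s : Nat) : Int))).2
      = ((accN m ls * 2 ^ (s - 2 * ls.length) : Nat) : Int) := by
  induction ls with
  | nil => intro s m _; simp [accN]
  | cons c ls ih =>
      intro s m hs
      rw [List.length_cons] at hs
      have h2s : 2 ≤ s := by omega
      simp only [List.foldl_cons]
      have hfst : ((s : Int) - 2) = ((s - 2 : Nat) : Int) := by omega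
      have hshtn : ((s : Int) - 2).toNat = s - 2 := by omega
      have hinit : PySem.Int.bor ((m * 2 ^ s : Nat) : Int)
          ((if c = 'A' then (0:Int) else if c = 'C' then 1 else if c = 'G' then 2 else 3)
            <<< ((s : Int) - 2).toNat)
          = (((m * 4 + codeN c) * 2 ^ (s - 2) : Nat) : Int) := by
        rw [bits_eq_codeN, hshtn, cast_shiftLeft, PySem.Int.bor_natCast]
        congr 1
        have hcd : codeN c <<< (s - 2) = codeN c * 2 ^ (s - 2) := Nat.shiftLeft_eq _ _
        have hdvd : 2 ^ s ∣ m * 2 ^ s := dvd_mul_left _ _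
        have hpow : (2:Nat) ^ s = 4 * 2 ^ (s - 2) := by
          have hse : (2:Nat) ^ s = 2 ^ (s - 2 + 2) := by congr 1; omega
          rw [hse, pow_add]; ring
        have hp : 0 < (2:Nat) ^ (s - 2) := pow_pos (by omega) _
        have hlt : codeN c <<< (s - 2) < 2 ^ s := by
          rw [hcd, hpow]
          exact (Nat.mul_lt_mul_right hp).mpr (codeN_lt c)
        rw [lor_disjoint s _ _ hdvd hlt, hcd, hpow]; ring
      rw [hinit, hfst, ih (s - 2) (m * 4 + codeN c) (by omega)]
      have hacc : accN (m * 4 + codeN c) ls = accN m (c :: ls) := rfl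
      have hexp : s - 2 - 2 * ls.length = s - 2 * (c :: ls).length := by
        rw [List.length_cons]; omega
      rw [hacc, hexp]

-- B's divide-and-conquer encoder computes the base-4 value of the whole list
theorem encB_eq : ∀ (n : Nat) (ls : List Char), ls.length = n →
    encB ls = ((accN 0 ls : Nat) : Int) := by
  intro n
  induction n using Nat.strong_induction_on with
  | _ n ih =>
    intro ls hlen
    rw [encB]
    by_cases h0 : ls.length = 0
    · rw [if_pos h0]
      rw [List.length_eq_zero_iff] at h0
      subst h0; simp [accN]
    · rw [if_neg h0]
      by_cases h1 : ls.length = 1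
      · rw [dif_pos h1]
        match ls, h1 with
        | [c], _ =>
            show (if c = 'A' then (0:Int) else if c = 'C' then 1 else if c = 'G' then 2 else 3)
              = ((accN 0 [c] : Nat) : Int)
            rw [bits_eq_codeN]
            have : accN 0 [c] = codeN c := by simp [accN]
            rw [this]
      · rw [dif_neg h1]
        have hn2 : 2 ≤ ls.length := by omega
        set mid := ls.length / 2 with hmid
        have hmid1 : 1 ≤ mid := by omega
        have hmidlt : mid < ls.length := by omega
        have hltake : (ls.take mid).length = mid := by
          simp [List.length_take]; omega
        have hldrop : (ls.drop mid).length = ls.length - mid := by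
          simp [List.length_drop]
        show PySem.Int.bor (encB (ls.take mid) <<< (2 * (ls.drop mid).length)) (encB (ls.drop mid))
          = ((accN 0 ls : Nat) : Int)
        rw [ih (ls.take mid).length (by omega) _ rfl,
            ih (ls.drop mid).length (by omega) _ rfl]
        rw [cast_shiftLeft, PySem.Int.bor_natCast]
        have hsplit : ls = ls.take mid ++ ls.drop mid := (List.take_append_drop mid ls).symm
        conv_rhs => rw [hsplit]
        rw [accN_append]
        congr 1
        have hdvd : 2 ^ (2 * (ls.drop mid).length) ∣ accN 0 (ls.take mid) <<< (2 * (ls.drop mid).length) := by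
          rw [Nat.shiftLeft_eq]; exact dvd_mul_left _ _
        have h4 : (4:Nat) ^ (ls.drop mid).length = 2 ^ (2 * (ls.drop mid).length) := by
          rw [show (4:Nat) = 2 ^ 2 from rfl, ← pow_mul]
        have hblt : accN 0 (ls.drop mid) < 2 ^ (2 * (ls.drop mid).length) := by
          rw [← h4]; exact accN_lt _
        rw [lor_disjoint _ _ _ hdvd hblt, Nat.shiftLeft_eq, h4]

-- ===== VERDICT (by name: the statement is the Claim_ definition above) =====
theorem seq_to_up_to_29_spec : Claim_equal_seq_to_up_to_29 := by
  intro seq _ hpre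
  simp only [Spec_seq_to_up_to_29, seq_to_up_to_29, seq_to_up_to_29_alt]
  have hlen : seq.toList.length = seq.length := String.length_toList
  have hpre' : seq.length ≤ 29 := hpre
  -- A side
  have hA0 : ((64 - 6 : Int)).toNat = 58 := by decide
  have hres : ((seq.length : Int)) <<< ((64 - 6 : Int)).toNat
      = ((seq.length * 2 ^ 58 : Nat) : Int) := by
    rw [hA0, cast_shiftLeft, Nat.shiftLeft_eq]
  have h64 : ((64 - 6 : Int)) = ((58 : Nat) : Int) := by decide
  rw [hres, h64, loopA seq.toList 58 seq.length (by omega)]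
  -- B side
  rw [encB_eq seq.toList.length seq.toList rfl]
  have htn : ((58 - 2 * (seq.length : Int))).toNat = 58 - 2 * seq.length := by omega
  rw [htn, cast_shiftLeft, cast_shiftLeft, PySem.Int.bor_natCast]
  congr 1
  -- now a pure Nat identity
  have hps : (4:Nat) ^ seq.length * 2 ^ (58 - 2 * seq.length) = 2 ^ 58 := by
    rw [show (4:Nat) = 2 ^ 2 from rfl, ← pow_mul, ← pow_add]
    congr 1; omega
  have hdvd : 2 ^ 58 ∣ seq.length <<< 58 := by
    rw [Nat.shiftLeft_eq]; exact dvd_mul_left _ _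
  have haccb : accN 0 seq.toList < 4 ^ seq.length := by
    rw [← hlen]; exact accN_lt seq.toList
  have hlt : accN 0 seq.toList <<< (58 - 2 * seq.length) < 2 ^ 58 := by
    rw [Nat.shiftLeft_eq, ← hps]
    exact (Nat.mul_lt_mul_right (pow_pos (by omega) _)).mpr haccb
  rw [lor_disjoint 58 _ _ hdvd hlt, Nat.shiftLeft_eq, Nat.shiftLeft_eq,
      accN_split seq.toList seq.length, hlen]
  rw [Nat.add_mul, Nat.mul_assoc, hps]
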